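-- pv_equiv track=rewrite | github.com/carolyn-brodie/DayClass2023 | week5Wednesday/7.All.py | findAllTrue
-- ===== SOURCE A (Python) =====
-- def findAllTrue(lst, value):
--     found = True
--     count = 0
--     while found and (count < len(lst)):
--
--         if lst[count] <= value:
--             found = False
--         count += 1
--     return found
-- ===== SOURCE B (Python) =====
-- def findAllTrue(lst, value):
--     return not lst or min(lst) > value
-- ===== Notes on version B (the rewrite author's own statement) =====
-- stated objective: simpler
-- what changed: Replaces the flag-maintaining early-exit index loop with a reduce-then-test: take the minimum of the list once and compare it against value (empty list yields True).
import Mathlib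
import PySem

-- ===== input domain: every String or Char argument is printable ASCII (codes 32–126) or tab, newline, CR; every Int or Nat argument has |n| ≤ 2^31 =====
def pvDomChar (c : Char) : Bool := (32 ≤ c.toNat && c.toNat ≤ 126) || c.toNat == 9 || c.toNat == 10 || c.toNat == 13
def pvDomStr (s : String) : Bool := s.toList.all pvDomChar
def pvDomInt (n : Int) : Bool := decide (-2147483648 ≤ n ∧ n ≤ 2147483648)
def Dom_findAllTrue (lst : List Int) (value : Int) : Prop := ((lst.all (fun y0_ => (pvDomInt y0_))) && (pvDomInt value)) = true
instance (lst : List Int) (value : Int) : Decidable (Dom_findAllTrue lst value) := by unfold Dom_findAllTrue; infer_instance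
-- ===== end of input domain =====

-- B replaces A's flag-maintaining early-exit index loop with a reduce-then-test: min(lst) > value (True on empty); objective: simpler.


-- ===== PORT A =====
def findAllTrueLoop (lst : List Int) (value : Int) (found : Bool) (count : Nat) : Bool :=
  if h : found = true ∧ count < lst.length then
    let found' := if lst[count]'h.2 ≤ value then false else found
    findAllTrueLoop lst value found' (count + 1)
  else
    found
termination_by lst.length - count
decreasing_by omega

def findAllTrue (lst : List Int) (value : Int) : Bool :=
  findAllTrueLoop lst value true 0

-- ===== PORT B =====
def findAllTrue_alt (lst : List Int) (value : Int) : Bool :=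
  match PySem.List.min? lst (fun x => x) with
  | none => true
  | some m => value < m

-- ===== PRECONDITION & SPEC =====
def Spec_findAllTrue (lst : List Int) (value : Int) (out : Bool) : Prop := out = findAllTrue_alt lst value
instance (lst : List Int) (value : Int) (out : Bool) : Decidable (Spec_findAllTrue lst value out) := by unfold Spec_findAllTrue; infer_instance

-- ===== CLAIM (what is proved, stated in full; the proofs are below) =====
def Claim_equal_findAllTrue : Prop := ∀ (lst : List Int) (value : Int), Dom_findAllTrue lst value → Spec_findAllTrue lst value (findAllTrue lst value)

-- ===== LEMMAS AND PROOFS =====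

-- ===== VERDICT (by name: the statement is the Claim_ definition above) =====
theorem loopA_false (lst : List Int) (value : Int) (count : Nat) :
    findAllTrueLoop lst value false count = false := by
  unfold findAllTrueLoop
  simp

theorem loopA_true (lst : List Int) (value : Int) (count : Nat) :
    findAllTrueLoop lst value true count
      = (lst.drop count).all (fun x => decide (value < x)) := by
  by_cases hlt : count < lst.length
  · rw [findAllTrueLoop]
    have hd : lst.drop count = lst[count] :: lst.drop (count + 1) :=
      (List.getElem_cons_drop hlt).symm
    by_cases hle : lst[count] ≤ value
    · simp only [hlt, and_true, hle, if_pos, loopA_false, hd, List.all_cons]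
      simp [show ¬ value < lst[count] by omega]
    · have := loopA_true lst value (count + 1)
      simp only [hlt, and_true, if_neg hle, this, hd, List.all_cons]
      simp [show value < lst[count] by omega]
  · rw [findAllTrueLoop]
    simp [hlt, List.drop_eq_nil_of_le (by omega : lst.length ≤ count)]
termination_by lst.length - count
decreasing_by omega

theorem alt_eq_all (lst : List Int) (value : Int) :
    findAllTrue_alt lst value = lst.all (fun x => decide (value < x)) := by
  unfold findAllTrue_alt
  cases hm : PySem.List.min? lst (fun x => x) with
  | none =>
    have : lst = [] := (PySem.List.min?_eq_none_iff lst (fun x => x)).1 hm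
    simp [this]
  | some m =>
    have hmem : m ∈ lst := PySem.List.min?_mem hm
    have hmin : ∀ y ∈ lst, m ≤ y := fun y hy => PySem.List.min?_isMin hm y hy
    by_cases h : value < m
    · symm
      simp only [decide_eq_true h, List.all_eq_true]
      intro x hx
      have := hmin x hx
      simp only [decide_eq_true_eq]
      omega
    · symm
      simp only [decide_eq_false h, List.all_eq_false]
      exact ⟨m, hmem, by simp [h]⟩

theorem findAllTrue_spec : Claim_equal_findAllTrue := by
  intro lst value _
  unfold Spec_findAllTrue
  rw [findAllTrue, loopA_true, alt_eq_all, List.drop_zero]
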